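-- pv_equiv track=rewrite | github.com/veltzer/demos-python | exercises/basic/odds_minus_evens/solution2.py | odds_minus_evens
-- ===== SOURCE A (Python) =====
-- def odds_minus_evens(l):
--     sum = 0
--     for x in l:
--         if x % 2 == 0:
--             sum -= x
--         else:
--             sum += x
--     return sum
-- ===== SOURCE B (Python) =====
-- def odds_minus_evens(l):
--     odds = sum(x for x in l if x % 2 != 0)
--     evens = sum(x for x in l if x % 2 == 0)
--     return odds - evens
-- ===== Notes on version B (the rewrite author's own statement) =====
-- stated objective: alternative
-- what changed: Replaced the single branching accumulator loop with two separate filtered summations (sum of odds minus sum of evens).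
import Mathlib
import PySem

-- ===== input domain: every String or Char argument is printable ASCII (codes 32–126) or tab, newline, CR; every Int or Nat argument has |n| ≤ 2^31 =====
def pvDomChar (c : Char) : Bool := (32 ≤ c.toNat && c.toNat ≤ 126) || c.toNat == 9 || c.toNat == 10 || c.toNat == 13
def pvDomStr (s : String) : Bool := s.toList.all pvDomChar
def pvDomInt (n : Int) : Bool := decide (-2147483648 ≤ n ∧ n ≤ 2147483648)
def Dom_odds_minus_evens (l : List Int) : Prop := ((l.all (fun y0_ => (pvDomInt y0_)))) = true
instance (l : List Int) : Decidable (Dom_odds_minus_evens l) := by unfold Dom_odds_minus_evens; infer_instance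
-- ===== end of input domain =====

-- B computes the same result as two filtered summations instead of one branching loop; same cost.

-- ===== PORT A =====
-- literal port of A: one fold, subtract evens, add odds
def odds_minus_evens (l : List Int) : Int :=
  l.foldl (fun sum x => if PySem.Int.mod x 2 = 0 then sum - x else sum + x) 0

-- ===== PORT B =====
-- literal port of B: sum of odd elements minus sum of even elements
def odds_minus_evens_alt (l : List Int) : Int :=
  (l.filter (fun x => PySem.Int.mod x 2 ≠ 0)).sum - (l.filter (fun x => PySem.Int.mod x 2 = 0)).sum

-- ===== PRECONDITION & SPEC =====
def Spec_odds_minus_evens (l : List Int) (out : Int) : Prop := out = odds_minus_evens_alt l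
instance (l : List Int) (out : Int) : Decidable (Spec_odds_minus_evens l out) := by unfold Spec_odds_minus_evens; infer_instance

-- ===== CLAIM (what is proved, stated in full; the proofs are below) =====
def Claim_equal_odds_minus_evens : Prop := ∀ (l : List Int), Dom_odds_minus_evens l → Spec_odds_minus_evens l (odds_minus_evens l)

-- ===== LEMMAS AND PROOFS =====
theorem omE_foldl_shift (l : List Int) (s : Int) :
    l.foldl (fun sum x => if PySem.Int.mod x 2 = 0 then sum - x else sum + x) s
      = s + l.foldl (fun sum x => if PySem.Int.mod x 2 = 0 then sum - x else sum + x) 0 := by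
  induction l generalizing s with
  | nil => simp
  | cons x xs ih =>
    simp only [List.foldl_cons]
    rw [ih, ih (if PySem.Int.mod x 2 = 0 then 0 - x else 0 + x)]
    split_ifs <;> ring

theorem omE_eq (l : List Int) : odds_minus_evens l = odds_minus_evens_alt l := by
  induction l with
  | nil => simp [odds_minus_evens, odds_minus_evens_alt]
  | cons x xs ih =>
    simp only [odds_minus_evens, odds_minus_evens_alt, List.foldl_cons] at *
    rw [omE_foldl_shift, ih]
    by_cases h : PySem.Int.mod x 2 = 0 <;>
      simp only [List.filter_cons, h, if_pos, if_neg, decide_eq_true_eq,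
        ne_eq, not_true_eq_false, not_false_eq_true, if_true, if_false,
        List.sum_cons] <;> ring

-- ===== VERDICT (by name: the statement is the Claim_ definition above) =====
theorem odds_minus_evens_spec : Claim_equal_odds_minus_evens := by
  intro l _
  exact omE_eq l
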